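-- pv_equiv track=rewrite | github.com/huangyunict/euler_project | solutions/solution_310.py | solve_p310
-- ===== SOURCE A (Python) =====
-- def get_all_squares(n: int) -> list[int]:
--     """ Return all positive square numbers that are less than or equal to n.
--
--     :param n: the upper bound (inclusive).
--     :return: all square numbers that are less than or equal to n.
--     """
--     result = list()
--     k = 1
--     while k * k <= n:
--         result.append(k * k)
--         k += 1
--     return result
--
-- def map_square_nim(n: int) -> list[int]:
--     """ Map square nim #k to basic nim *k for all 0<=k<=n.
--
--     :param n: the length of square nim heap.
--     :return: the list of mapped the length of basic nim heap.
--     """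
--     squares = get_all_squares(n)
--     result = [0]
--     for k in range(1, n + 1):
--         # Calculate sub nim set.
--         sub_nim_set = set()
--         for sq in squares:
--             if sq > k:
--                 break
--             sub_nim_set.add(result[k - sq])
--         # Find minimum excluded value in sub nim set.
--         for mex in range(k + 1):
--             if mex not in sub_nim_set:
--                 result.append(mex)
--                 break
--     return result
--
-- def solve_p310(n: int) -> int:
--     nim_values = map_square_nim(n)
--     # Get the count of mapped basic nim values.
--     nim_counts = dict()
--     for nim in nim_values:
--         nim_counts[nim] = nim_counts.get(nim, 0) + 1
--     # Loop and count.
--     result = 0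
--     for a in range(n + 1):
--         # Calculate zero count of given `a`, which corresponds to the count of `a<=b=c<=n`.
--         zero_count = (n + 1 - a) if nim_values[a] == 0 else 0
--         # Calculate current count of given `a`, and `a<=b<=n,a<=c<=n`.
--         curr_count = 0
--         for b_nim, b_cnt in nim_counts.items():
--             x = nim_values[a] ^ b_nim
--             curr_count += b_cnt * nim_counts.get(x, 0)
--         # Adjust current count from condition `a<=b<=n,a<=c<=n` to `a<=b<=c<=n`.
--         assert (curr_count + zero_count) % 2 == 0
--         result += (curr_count + zero_count) // 2
--         # Remove mapped basic nim of a from nim counts for the next round.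
--         nim_counts[nim_values[a]] -= 1
--     return result
-- ===== SOURCE B (Python) =====
-- def get_all_squares(n: int) -> list[int]:
--     """ Return all positive square numbers that are less than or equal to n. """
--     result = list()
--     k = 1
--     while k * k <= n:
--         result.append(k * k)
--         k += 1
--     return result
--
--
-- def map_square_nim(n: int) -> list[int]:
--     """ Map square nim #k to basic nim *k for all 0<=k<=n. """
--     squares = get_all_squares(n)
--     result = [0]
--     for k in range(1, n + 1):
--         sub_nim_set = set()
--         for sq in squares:
--             if sq > k:
--                 break
--             sub_nim_set.add(result[k - sq])
--         for mex in range(k + 1):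
--             if mex not in sub_nim_set:
--                 result.append(mex)
--                 break
--     return result
--
--
-- def solve_p310(n: int) -> int:
--     # Closed-form multiset counting: no sweep over `a`, no shrinking dict.
--     # Count ordered triples (i,j,k) with grundy xor 0 via one convolution of the
--     # frequency table, then convert to ordered-by-index triples a<=b<=c in O(1).
--     nim_values = map_square_nim(n)
--     counts = {}
--     for a in range(n + 1):
--         v = nim_values[a]
--         counts[v] = counts.get(v, 0) + 1
--     z = counts.get(0, 0)
--     total_ordered = sum(
--         cv * sum(cx * counts.get(x ^ v, 0) for x, cx in counts.items())
--         for v, cv in counts.items())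
--     return z + z * n + (total_ordered - z - 3 * z * n) // 6
-- ===== Notes on version B (the rewrite author's own statement) =====
-- stated objective: alternative
-- what changed: A's per-index sweep (for each a, convolve the Grundy value at a against a shrinking frequency dict of the suffix) is replaced by a closed-form multiset count: build the frequency table once, compute the ordered-triple XOR convolution total, and convert ordered triples to index-sorted triples a<=b<=c by the arithmetic formula z + z*n + (total - z - 3*z*n)//6.
import Mathlib
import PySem

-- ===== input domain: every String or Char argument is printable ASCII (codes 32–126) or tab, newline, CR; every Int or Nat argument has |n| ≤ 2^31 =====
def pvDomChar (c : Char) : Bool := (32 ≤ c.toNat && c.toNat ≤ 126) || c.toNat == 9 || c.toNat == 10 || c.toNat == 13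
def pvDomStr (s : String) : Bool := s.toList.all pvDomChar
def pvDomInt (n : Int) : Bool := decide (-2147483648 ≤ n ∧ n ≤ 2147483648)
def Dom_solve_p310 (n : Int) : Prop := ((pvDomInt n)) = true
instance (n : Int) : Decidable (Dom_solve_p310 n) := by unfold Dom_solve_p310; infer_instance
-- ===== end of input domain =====

-- B replaces A's per-index sweep over a shrinking dict by a closed-form multiset count:
-- one frequency table, one XOR convolution, then arithmetic (alternative algorithm).

-- ===== PORT A =====
-- get_all_squares: the while loop 'k = 1; while k*k <= n: append k*k; k += 1'
def gasLoop (n k : Int) (acc : List Int) : List Int :=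
  if k * k ≤ n then gasLoop n (k + 1) (acc ++ [k * k]) else acc
termination_by (n + 2 - k).toNat
decreasing_by
  rename_i h
  have hn : 0 ≤ n := le_trans (mul_self_nonneg k) h
  have hk2 : k < n + 2 := by
    by_cases hk : k ≤ 0
    · omega
    · nlinarith
  omega

def get_all_squares (n : Int) : List Int := gasLoop n 1 []

-- one iteration of map_square_nim's main loop; the 'for sq in squares: if sq > k: break'
-- loop is ported as a fold over the takeWhile prefix (the elements the loop processes);
-- result[k - sq] is always in range here, ported with the total pyGetD
def msnStep (squares : List Int) (result : List Int) (k : Int) : List Int :=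
  let subNim : PySem.Set Int :=
    (squares.takeWhile (fun sq => !(decide (k < sq)))).foldl
      (fun s sq => s.add (PySem.List.pyGetD result (k - sq) 0)) PySem.Set.empty
  match (PySem.List.pyRange 0 (k + 1) 1).find? (fun m => !(subNim.contains m)) with
  | some mex => result ++ [mex]
  | none => result

def map_square_nim (n : Int) : List Int :=
  (PySem.List.pyRange 1 (n + 1) 1).foldl (msnStep (get_all_squares n)) [0]

-- body of A's main loop; nim_values[a] is always in range (total pyGetD); the assert
-- has no effect when it passes in Python, so it adds nothing to the port; '//' is floordiv
def stepA (n : Int) (nim : List Int) (st : PySem.Dict Int Int × Int) (a : Int) :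
    PySem.Dict Int Int × Int :=
  let x := PySem.List.pyGetD nim a 0
  let zero : Int := if x == 0 then n + 1 - a else 0
  let curr := st.1.items.foldl (fun acc p => acc + p.2 * st.1.getD (PySem.Int.bxor x p.1) 0) 0
  (st.1.modify x 0 (fun c => c - 1), st.2 + PySem.Int.floordiv (curr + zero) 2)

def solve_p310 (n : Int) : Int :=
  let nim := map_square_nim n
  let counts0 := nim.foldl (fun d v => d.insert v (d.getD v 0 + 1)) PySem.Dict.empty
  ((PySem.List.pyRange 0 (n + 1) 1).foldl (stepA n nim) (counts0, 0)).2

-- ===== PORT B =====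
def solve_p310_alt (n : Int) : Int :=
  let nim := map_square_nim n
  let counts := (PySem.List.pyRange 0 (n + 1) 1).foldl
    (fun d a =>
      let v := PySem.List.pyGetD nim a 0
      d.insert v (d.getD v 0 + 1)) PySem.Dict.empty
  let z := counts.getD 0 0
  let totalOrdered := (counts.items.map (fun p =>
    p.2 * (counts.items.map (fun q => q.2 * counts.getD (PySem.Int.bxor q.1 p.1) 0)).sum)).sum
  z + z * n + PySem.Int.floordiv (totalOrdered - z - 3 * z * n) 6

-- ===== PRECONDITION & SPEC =====
def Spec_solve_p310 (n : Int) (out : Int) : Prop := out = solve_p310_alt n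
instance (n : Int) (out : Int) : Decidable (Spec_solve_p310 n out) := by unfold Spec_solve_p310; infer_instance

-- ===== CLAIM (what is proved, stated in full; the proofs are below) =====
def Claim_equal_solve_p310 : Prop := ∀ (n : Int), Dom_solve_p310 n → Spec_solve_p310 n (solve_p310 n)

-- ===== LEMMAS AND PROOFS =====

-- cancellation law for Python xor
lemma bxor_cancel (x y : Int) : PySem.Int.bxor x (PySem.Int.bxor x y) = y := by
  unfold PySem.Int.bxor
  rcases le_or_gt 0 x with hx | hx <;> rcases le_or_gt 0 y with hy | hy
  · have h1 : (0:Int) ≤ ((x.toNat ^^^ y.toNat : Nat) : Int) := Int.natCast_nonneg _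
    simp [hx, hy, h1, Nat.xor_xor_cancel_left]
  · have h1 : ¬ (0:Int) ≤ -((x.toNat ^^^ (-y-1).toNat : Nat) : Int) - 1 := by
      have := Int.natCast_nonneg ((x.toNat ^^^ (-y-1).toNat : Nat)); omega
    simp only [if_pos hx, if_neg (not_le.mpr hy), if_neg h1]
    have h2 : (-(-((x.toNat ^^^ (-y-1).toNat : Nat) : Int) - 1) - 1).toNat = x.toNat ^^^ (-y-1).toNat := by omega
    rw [h2, Nat.xor_xor_cancel_left]
    omega
  · have h1 : ¬ (0:Int) ≤ -(((-x-1).toNat ^^^ y.toNat : Nat) : Int) - 1 := by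
      have := Int.natCast_nonneg (((-x-1).toNat ^^^ y.toNat : Nat)); omega
    simp only [if_neg (not_le.mpr hx), if_pos hy, if_neg h1]
    have h2 : (-(-(((-x-1).toNat ^^^ y.toNat : Nat) : Int) - 1) - 1).toNat = (-x-1).toNat ^^^ y.toNat := by omega
    rw [h2, Nat.xor_xor_cancel_left]
    omega
  · have h1 : (0:Int) ≤ (((-x-1).toNat ^^^ (-y-1).toNat : Nat) : Int) := Int.natCast_nonneg _
    simp only [if_neg (not_le.mpr hx), if_neg (not_le.mpr hy), if_pos h1]
    have h2 : ((((-x-1).toNat ^^^ (-y-1).toNat : Nat) : Int)).toNat = (-x-1).toNat ^^^ (-y-1).toNat := Int.toNat_natCast _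
    rw [h2, Nat.xor_xor_cancel_left]
    omega

lemma bxor_eq_iff (x w y : Int) : PySem.Int.bxor x w = y ↔ w = PySem.Int.bxor x y := by
  constructor
  · intro h; rw [← h, bxor_cancel]
  · intro h; rw [h, bxor_cancel]

lemma bxor_eq_self_iff (x y : Int) : PySem.Int.bxor x y = y ↔ x = 0 := by
  rw [PySem.Int.bxor_comm, bxor_eq_iff, PySem.Int.bxor_self]

-- exact division by positive literals
lemma fdiv_two (k : Int) : PySem.Int.floordiv (2 * k) 2 = k := by
  simp [PySem.Int.floordiv]

lemma fdiv_six (k : Int) : PySem.Int.floordiv (6 * k) 6 = k := by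
  simp [PySem.Int.floordiv]

-- the multiset of nim values at indices a..n (pyGetD: all accesses are in range)
def pvM (L : List Int) (n a : Int) : List Int :=
  (PySem.List.pyRange a (n + 1) 1).map (fun j => PySem.List.pyGetD L j 0)

-- the per-index contribution of A's loop
def pvG (L : List Int) (n a : Int) : Int :=
  let x := PySem.List.pyGetD L a 0
  let l := pvM L n a
  PySem.Int.floordiv
    ((l.map (fun y => ((l.count (PySem.Int.bxor x y) : Nat) : Int))).sum +
      (if x == 0 then n + 1 - a else 0)) 2

-- xor-pair statistics of a multiset l: ordered pairs whose xor with x vanishes,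
-- ordered triples with vanishing xor, and index-sorted pairs (pairLE) / triples (triLE)
def pvP2 (x : Int) (l : List Int) : Int :=
  (l.map (fun y => ((l.count (PySem.Int.bxor x y) : Nat) : Int))).sum

def pvOrd3 (l : List Int) : Int := (l.map (fun v => pvP2 v l)).sum

def pairLE (x : Int) : List Int → Int
  | [] => 0
  | y :: M => (if x = 0 then 1 else 0) + ((M.count (PySem.Int.bxor x y) : Nat) : Int) + pairLE x M

def triLE : List Int → Int
  | [] => 0
  | x :: M => pairLE x (x :: M) + triLE M

lemma pvM_cons (L : List Int) (n a : Int) (h : a < n + 1) :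
    pvM L n a = PySem.List.pyGetD L a 0 :: pvM L n (a + 1) := by
  unfold pvM
  rw [PySem.List.pyRange_one_cons h, List.map_cons]

lemma pvM_length (L : List Int) (n a : Int) : (pvM L n a).length = (n + 1 - a).toNat := by
  unfold pvM
  rw [List.length_map, PySem.List.length_pyRange_one]

lemma sum_single (g : Int → Int) (keys : List Int) (y : Int)
    (hnd : keys.Nodup) (hy : y ∈ keys) :
    (keys.map (fun k => (if y == k then (1 : Int) else 0) * g k)).sum = g y := by
  induction keys with
  | nil => cases hy
  | cons a t ih =>
    rcases List.nodup_cons.mp hnd with ⟨ha, hnt⟩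
    by_cases hay : a = y
    · subst hay
      have hzero : (t.map (fun k => (if a == k then (1 : Int) else 0) * g k)).sum = 0 := by
        apply List.sum_eq_zero
        intro z hz
        rcases List.mem_map.mp hz with ⟨k, hk, rfl⟩
        have hka : a ≠ k := fun h => ha (h ▸ hk)
        simp [hka]
      simp only [List.map_cons, List.sum_cons, hzero]
      simp
    · have hyt : y ∈ t := by
        rcases List.mem_cons.mp hy with h | h
        · exact absurd h.symm hay
        · exact h
      have hya : y ≠ a := fun h => hay h.symm
      simp only [List.map_cons, List.sum_cons, ih hnt hyt]
      simp [hya]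

lemma count_mul_sum (g : Int → Int) (l : List Int) : ∀ (keys : List Int),
    keys.Nodup → (∀ y ∈ l, y ∈ keys) →
    (keys.map (fun k => ((l.count k : Nat) : Int) * g k)).sum = (l.map g).sum := by
  induction l with
  | nil => intro keys _ _; simp
  | cons y t ih =>
    intro keys hnd hcov
    have hsplit : keys.map (fun k => (((y :: t).count k : Nat) : Int) * g k)
        = keys.map (fun k =>
            ((t.count k : Nat) : Int) * g k + (if y == k then (1 : Int) else 0) * g k) := by
      apply List.map_congr_left
      intro k _
      rw [List.count_cons]
      push_cast
      rw [add_mul]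
    rw [hsplit, PySem.List.sum_map_add_int]
    rw [ih keys hnd (fun z hz => hcov z (List.mem_cons_of_mem _ hz))]
    rw [sum_single g keys y hnd (hcov y (List.mem_cons_self))]
    simp only [List.map_cons, List.sum_cons]
    ring

-- a dict holding the multiplicities of l: Σ over items of value * g key = Σ over l of g
lemma items_weighted_sum (d : PySem.Dict Int Int) (l : List Int) (g : Int → Int)
    (hnd : d.keys.Nodup) (hcov : ∀ y ∈ l, y ∈ d.keys)
    (hcnt : ∀ v, d.getD v 0 = ((l.count v : Nat) : Int)) :
    (d.items.map (fun p => p.2 * g p.1)).sum = (l.map g).sum := by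
  rw [PySem.Dict.items_eq_map_keys d hnd 0, List.map_map]
  have hc : d.keys.map ((fun p => p.2 * g p.1) ∘ fun k => (k, d.getD k 0))
      = d.keys.map (fun k => ((l.count k : Nat) : Int) * g k) := by
    apply List.map_congr_left
    intro k _
    simp only [Function.comp]
    rw [hcnt]
  rw [hc, count_mul_sum g l d.keys hnd hcov]

lemma items_conv_sum (d : PySem.Dict Int Int) (l : List Int) (x : Int)
    (hnd : d.keys.Nodup) (hcov : ∀ y ∈ l, y ∈ d.keys)
    (hcnt : ∀ v, d.getD v 0 = ((l.count v : Nat) : Int)) :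
    (d.items.map (fun p => p.2 * d.getD (PySem.Int.bxor x p.1) 0)).sum = pvP2 x l := by
  have h := items_weighted_sum d l (fun k => d.getD (PySem.Int.bxor x k) 0) hnd hcov hcnt
  rw [h]
  unfold pvP2
  apply congrArg
  apply List.map_congr_left
  intro y _
  rw [hcnt]

-- Σ over l of the indicator of t = count of t
lemma sum_indicator_count (t : Int) (l : List Int) :
    (l.map (fun w => if w = t then (1 : Int) else 0)).sum = ((l.count t : Nat) : Int) := by
  induction l with
  | nil => simp
  | cons y M ih =>
    simp only [List.map_cons, List.sum_cons, ih, List.count_cons]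
    by_cases h : y = t
    · subst h; simp; ring
    · simp [h]

lemma p2_cons (x y : Int) (M : List Int) :
    pvP2 x (y :: M) = (if x = 0 then 1 else 0)
      + 2 * ((M.count (PySem.Int.bxor x y) : Nat) : Int) + pvP2 x M := by
  unfold pvP2
  simp only [List.map_cons, List.sum_cons]
  have hhead : (((y :: M).count (PySem.Int.bxor x y) : Nat) : Int)
      = (if x = 0 then 1 else 0) + ((M.count (PySem.Int.bxor x y) : Nat) : Int) := by
    rw [List.count_cons]
    by_cases hx : x = 0
    · subst hx
      have hy : PySem.Int.bxor 0 y = y := (bxor_eq_self_iff 0 y).mpr rfl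
      simp [hy]
      linarith
    · have hy : PySem.Int.bxor x y ≠ y := fun h => hx ((bxor_eq_self_iff x y).mp h)
      have hy' : y ≠ PySem.Int.bxor x y := fun h => hy h.symm
      simp [hx, hy']
  have htail : M.map (fun w => (((y :: M).count (PySem.Int.bxor x w) : Nat) : Int))
      = M.map (fun w => ((M.count (PySem.Int.bxor x w) : Nat) : Int)
          + (if w = PySem.Int.bxor x y then (1 : Int) else 0)) := by
    apply List.map_congr_left
    intro w _
    rw [List.count_cons]
    by_cases hw : w = PySem.Int.bxor x y
    · subst hw
      rw [bxor_cancel]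
      simp
    · have h1 : PySem.Int.bxor x w ≠ y := fun h => hw ((bxor_eq_iff x w y).mp h)
      have h1' : y ≠ PySem.Int.bxor x w := fun h => h1 h.symm
      simp [hw, h1']
  rw [hhead, htail, PySem.List.sum_map_add_int, sum_indicator_count]
  ring

lemma ord3_cons (x : Int) (M : List Int) :
    pvOrd3 (x :: M) = (if x = 0 then 1 else 0) + 3 * ((M.count 0 : Nat) : Int)
      + 3 * pvP2 x M + pvOrd3 M := by
  unfold pvOrd3
  simp only [List.map_cons, List.sum_cons]
  have hhead : pvP2 x (x :: M)
      = (if x = 0 then 1 else 0) + 2 * ((M.count 0 : Nat) : Int) + pvP2 x M := by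
    rw [p2_cons, PySem.Int.bxor_self]
  have htail : M.map (fun v => pvP2 v (x :: M))
      = M.map (fun v => ((if v = 0 then (1 : Int) else 0)
          + 2 * ((M.count (PySem.Int.bxor x v) : Nat) : Int)) + pvP2 v M) := by
    apply List.map_congr_left
    intro v _
    rw [p2_cons, PySem.Int.bxor_comm v x]
  rw [hhead, htail, PySem.List.sum_map_add_int, PySem.List.sum_map_add_int,
    sum_indicator_count]
  have h3 : (M.map (fun v => 2 * ((M.count (PySem.Int.bxor x v) : Nat) : Int))).sum
      = 2 * pvP2 x M := by
    rw [List.sum_map_mul_left]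
    rfl
  rw [h3]
  unfold pvP2
  ring

lemma pair2 (x : Int) (l : List Int) :
    2 * pairLE x l = pvP2 x l + (if x = 0 then ((l.length : Nat) : Int) else 0) := by
  induction l with
  | nil => simp [pairLE, pvP2]
  | cons y M ih =>
    rw [pairLE, p2_cons]
    by_cases hx : x = 0 <;> simp [hx, List.length_cons] at ih ⊢ <;> linarith [ih]

-- the key identity: 6 × (index-sorted triples with xor 0) =
--   (ordered triples with xor 0) + 3·|l|·count 0 + 2·count 0
lemma six_triLE (l : List Int) :
    6 * triLE l = pvOrd3 l + 3 * ((l.length : Nat) : Int) * ((l.count 0 : Nat) : Int)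
      + 2 * ((l.count 0 : Nat) : Int) := by
  induction l with
  | nil => simp [triLE, pvOrd3]
  | cons x M ih =>
    rw [triLE, pairLE, PySem.Int.bxor_self, ord3_cons]
    have hp := pair2 x M
    have hcnt : (((x :: M).count 0 : Nat) : Int)
        = ((M.count 0 : Nat) : Int) + (if x = 0 then 1 else 0) := by
      rw [List.count_cons]
      by_cases hx : x = 0
      · subst hx; simp
      · simp [hx]
    rw [hcnt]
    have hlen : (((x :: M).length : Nat) : Int) = ((M.length : Nat) : Int) + 1 := by
      simp
    rw [hlen]
    by_cases hx : x = 0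
    · simp [hx] at hp ⊢
      nlinarith [ih, hp]
    · simp [hx] at hp ⊢
      nlinarith [ih, hp]

-- ---- get_all_squares: the i-th square is (i+1)^2 ----
lemma gasLoop_get (n : Int) : ∀ (t : Nat) (k : Int) (acc : List Int),
    (n + 2 - k).toNat = t →
    k = (acc.length : Int) + 1 →
    (∀ i : Nat, i < acc.length → acc[i]? = some (((i : Int) + 1) * ((i : Int) + 1))) →
    ∀ i : Nat, i < (gasLoop n k acc).length →
      (gasLoop n k acc)[i]? = some (((i : Int) + 1) * ((i : Int) + 1)) := by
  intro t
  induction t with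
  | zero =>
    intro k acc ht hk hacc i h
    rw [gasLoop.eq_def] at h ⊢
    have hkn : ¬ k * k ≤ n := by
      intro hle
      have hn : 0 ≤ n := le_trans (mul_self_nonneg k) hle
      have hl0 : 0 ≤ (acc.length : Int) := Int.natCast_nonneg _
      have hk1 : 1 ≤ k := by omega
      have hkk : k ≤ k * k := by nlinarith
      omega
    simp only [if_neg hkn] at h ⊢
    exact hacc i h
  | succ t ih =>
    intro k acc ht hk hacc i h
    rw [gasLoop.eq_def] at h ⊢
    by_cases hle : k * k ≤ n
    · simp only [if_pos hle] at h ⊢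
      refine ih (k + 1) (acc ++ [k * k]) (by omega) (by simp [hk]) ?_ i h
      intro j hj
      rcases lt_or_ge j acc.length with hj' | hj'
      · rw [List.getElem?_append_left hj']
        exact hacc j hj'
      · have hje : j = acc.length := by
          simp at hj; omega
        subst hje
        rw [List.getElem?_concat_length]
        rw [hk]
    · simp only [if_neg hle] at h ⊢
      exact hacc i h

lemma squares_get (n : Int) (i : Nat) (h : i < (get_all_squares n).length) :
    (get_all_squares n)[i] = ((i : Int) + 1) * ((i : Int) + 1) := by
  have h' : i < (gasLoop n 1 []).length := h
  have := gasLoop_get n (n + 1).toNat 1 [] (by omega) (by simp) (by simp) i h'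
  rw [List.getElem?_eq_getElem h'] at this
  exact Option.some.inj this

-- the prefix of squares that are ≤ k has at most k elements
lemma prefix_len_le (n k : Int) (hk : 1 ≤ k) :
    ((get_all_squares n).takeWhile (fun sq => !(decide (k < sq)))).length ≤ k.toNat := by
  set P := (get_all_squares n).takeWhile (fun sq => !(decide (k < sq))) with hP
  rcases Nat.eq_zero_or_pos P.length with h0 | hpos
  · omega
  · have hpre : P <+: get_all_squares n := by rw [hP]; exact List.takeWhile_prefix _
    have hlen : P.length ≤ (get_all_squares n).length := hpre.length_le
    have hidx : P.length - 1 < P.length := by omega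
    have hmem : P[P.length - 1] ∈ P := List.getElem_mem _
    have hmem' : P[P.length - 1]'hidx ∈
        (get_all_squares n).takeWhile (fun sq => !(decide (k < sq))) := by
      rw [← hP]; exact hmem
    have hpred := List.mem_takeWhile_imp hmem'
    have hval : P[P.length - 1]'hidx
        = (((P.length - 1 : Nat) : Int) + 1) * (((P.length - 1 : Nat) : Int) + 1) := by
      rw [hpre.getElem hidx]
      exact squares_get n (P.length - 1) (by omega)
    have hle2 : (((P.length - 1 : Nat) : Int) + 1) * (((P.length - 1 : Nat) : Int) + 1) ≤ k := by
      rw [← hval]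
      simpa using hpred
    have hcast : ((P.length - 1 : Nat) : Int) + 1 = (P.length : Int) := by
      push_cast [hpos]; omega
    rw [hcast] at hle2
    have hself : (P.length : Int) ≤ (P.length : Int) * (P.length : Int) := by nlinarith
    omega

-- the mex search always finds a value (pigeonhole)
lemma mex_found (k : Int) (squares result : List Int) (hk : 1 ≤ k)
    (hsq : (squares.takeWhile (fun sq => !(decide (k < sq)))).length ≤ k.toNat) :
    ((PySem.List.pyRange 0 (k + 1) 1).find? (fun m =>
      !(PySem.Set.contains ((squares.takeWhile (fun sq => !(decide (k < sq)))).foldl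
        (fun s sq => s.add (PySem.List.pyGetD result (k - sq) 0)) PySem.Set.empty) m))).isSome := by
  set P := squares.takeWhile (fun sq => !(decide (k < sq))) with hP
  set S := P.foldl (fun s sq => s.add (PySem.List.pyGetD result (k - sq) 0)) PySem.Set.empty with hS
  rcases hfind : (PySem.List.pyRange 0 (k + 1) 1).find? (fun m => !(S.contains m)) with _ | m
  · exfalso
    have hall := List.find?_eq_none.mp hfind
    have hsub : PySem.List.pyRange 0 (k + 1) 1 ⊆ S := by
      intro m hm
      have := hall m hm
      simp only [Bool.not_eq_true', Bool.not_eq_false] at this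
      exact (PySem.Set.contains_iff _ _).mp this
    have hnd := PySem.List.nodup_pyRange_one 0 (k + 1)
    have hle := (List.subperm_of_subset hnd hsub).length_le
    have h1 := PySem.List.length_pyRange_one 0 (k + 1)
    have hSof : S = PySem.Set.ofList (P.map (fun sq => PySem.List.pyGetD result (k - sq) 0)) := by
      rw [hS, ← PySem.Set.update_map_eq_foldl_add]
      rfl
    have h2 : S.length ≤ P.length := by
      rw [hSof]
      calc (PySem.Set.ofList (P.map fun sq => PySem.List.pyGetD result (k - sq) 0)).length
          ≤ (P.map fun sq => PySem.List.pyGetD result (k - sq) 0).length :=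
            PySem.Set.length_ofList_le _
        _ = P.length := List.length_map _
    omega
  · rfl

-- each iteration of map_square_nim's loop appends exactly one element
lemma msnStep_length (n k : Int) (hk : 1 ≤ k) (result : List Int) :
    (msnStep (get_all_squares n) result k).length = result.length + 1 := by
  have hfound := mex_found k (get_all_squares n) result hk (prefix_len_le n k hk)
  simp only [msnStep]
  split
  · simp
  · rename_i heq
    rw [heq] at hfound
    simp at hfound

lemma msnFold_length (n : Int) : ∀ (t : Nat) (a : Int) (res : List Int), 1 ≤ a →
    (n + 1 - a).toNat = t →
    ((PySem.List.pyRange a (n + 1) 1).foldl (msnStep (get_all_squares n)) res).length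
      = res.length + t := by
  intro t
  induction t with
  | zero =>
    intro a res ha ht
    rw [PySem.List.pyRange_one_eq_nil (by omega)]
    simp
  | succ t ih =>
    intro a res ha ht
    rw [PySem.List.pyRange_one_cons (by omega), List.foldl_cons]
    rw [ih (a + 1) (msnStep (get_all_squares n) res a) (by omega) (by omega)]
    rw [msnStep_length n a ha res]
    omega

lemma msn_length (n : Int) (hn : 0 ≤ n) : (map_square_nim n).length = (n + 1).toNat := by
  unfold map_square_nim
  rw [msnFold_length n n.toNat 1 [0] (by omega) (by omega)]
  simp
  omega

-- ---- A's loop computes r + Σ pvG over its index range ----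
lemma loopA (L : List Int) (n : Int) : ∀ (t : Nat) (a : Int) (d : PySem.Dict Int Int) (r : Int),
    (n + 1 - a).toNat = t →
    d.keys.Nodup →
    (∀ y ∈ pvM L n a, y ∈ d.keys) →
    (∀ v, d.getD v 0 = (((pvM L n a).count v : Nat) : Int)) →
    ((PySem.List.pyRange a (n + 1) 1).foldl (stepA n L) (d, r)).2
      = r + ((PySem.List.pyRange a (n + 1) 1).map (pvG L n)).sum := by
  intro t
  induction t with
  | zero =>
    intro a d r ht hnd hcov hcnt
    rw [PySem.List.pyRange_one_eq_nil (by omega)]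
    simp
  | succ t ih =>
    intro a d r ht hnd hcov hcnt
    have ha : a < n + 1 := by omega
    have hMc : pvM L n a = PySem.List.pyGetD L a 0 :: pvM L n (a + 1) := pvM_cons L n a ha
    rw [PySem.List.pyRange_one_cons ha, List.foldl_cons, List.map_cons, List.sum_cons]
    have hcurr : d.items.foldl
        (fun acc p => acc + p.2 * d.getD (PySem.Int.bxor (PySem.List.pyGetD L a 0) p.1) 0) 0
        = pvP2 (PySem.List.pyGetD L a 0) (pvM L n a) := by
      have h1 := PySem.List.foldl_add (l := d.items)
        (g := fun p => p.2 * d.getD (PySem.Int.bxor (PySem.List.pyGetD L a 0) p.1) 0) (a := 0)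
      rw [h1, items_conv_sum d (pvM L n a) (PySem.List.pyGetD L a 0) hnd hcov hcnt]
      simp
    have hstep : stepA n L (d, r) a
        = (d.modify (PySem.List.pyGetD L a 0) 0 (fun c => c - 1), r + pvG L n a) := by
      simp only [stepA, pvG, pvP2] at hcurr ⊢
      rw [hcurr]
    rw [hstep]
    have hnd' : (d.modify (PySem.List.pyGetD L a 0) 0 (fun c => c - 1)).keys.Nodup := by
      rw [PySem.Dict.keys_modify]
      exact PySem.Dict.nodup_keys_insert _ _ _ hnd
    have hcov' : ∀ y ∈ pvM L n (a + 1), y ∈ (d.modify (PySem.List.pyGetD L a 0) 0 (fun c => c - 1)).keys := by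
      intro y hy
      rw [PySem.Dict.keys_modify]
      exact (PySem.Dict.mem_keys_insert _ _ _ _).mpr
        (Or.inr (hcov y (hMc ▸ List.mem_cons_of_mem _ hy)))
    have hcnt' : ∀ v, (d.modify (PySem.List.pyGetD L a 0) 0 (fun c => c - 1)).getD v 0
        = (((pvM L n (a + 1)).count v : Nat) : Int) := by
      intro v
      rw [PySem.Dict.getD_modify]
      by_cases hv : v = PySem.List.pyGetD L a 0
      · subst hv
        rw [if_pos rfl, hcnt _, hMc, List.count_cons]
        simp
      · rw [if_neg hv, hcnt v, hMc, List.count_cons]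
        have : ¬ (PySem.List.pyGetD L a 0 == v) = true := by simp [beq_iff_eq]; exact fun h => hv h.symm
        simp [this]
    rw [ih (a + 1) _ (r + pvG L n a) (by omega) hnd' hcov' hcnt']
    ring

-- Σ of A's per-index contributions over a..n = index-sorted xor-0 triples of the suffix
lemma sumA (L : List Int) (n : Int) : ∀ (t : Nat) (a : Int), (n + 1 - a).toNat = t →
    ((PySem.List.pyRange a (n + 1) 1).map (pvG L n)).sum = triLE (pvM L n a) := by
  intro t
  induction t with
  | zero =>
    intro a ht
    rw [PySem.List.pyRange_one_eq_nil (by omega)]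
    unfold pvM
    rw [PySem.List.pyRange_one_eq_nil (by omega)]
    simp [triLE]
  | succ t ih =>
    intro a ht
    have ha : a < n + 1 := by omega
    have hMc : pvM L n a = PySem.List.pyGetD L a 0 :: pvM L n (a + 1) := pvM_cons L n a ha
    rw [PySem.List.pyRange_one_cons ha, List.map_cons, List.sum_cons, ih (a + 1) (by omega)]
    rw [hMc, triLE]
    have hG : pvG L n a = pairLE (PySem.List.pyGetD L a 0)
        (PySem.List.pyGetD L a 0 :: pvM L n (a + 1)) := by
      set x := PySem.List.pyGetD L a 0 with hx
      have hlen : ((pvM L n a).length : Int) = n + 1 - a := by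
        rw [pvM_length]; omega
      have hif : (if x == 0 then n + 1 - a else 0)
          = (if x = 0 then (((pvM L n a).length : Nat) : Int) else 0) := by
        rw [hlen]
        by_cases h0 : x = 0 <;> simp [h0]
      have hpair := pair2 x (pvM L n a)
      simp only [pvG, pvP2] at hpair ⊢
      rw [hif, ← hpair, fdiv_two, hMc]
    rw [hG]

-- ===== VERDICT helper: the two closed values agree =====
lemma main_eq (n : Int) : solve_p310 n = solve_p310_alt n := by
  by_cases hn : 0 ≤ n
  · simp only [solve_p310, solve_p310_alt]
    set L := map_square_nim n with hL
    have hlen : L.length = (n + 1).toNat := msn_length n hn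
    have hM0 : pvM L n 0 = L := by
      unfold pvM
      have h1 : n + 1 = ((L.length : Nat) : Int) := by omega
      rw [h1]
      exact PySem.List.map_pyGetD_pyRange_zero' L 0
    have hc0 : L.foldl (fun d v => d.insert v (d.getD v 0 + 1)) PySem.Dict.empty
        = PySem.Dict.counter L := PySem.Dict.foldl_insert_getD_add_one_eq_counter L
    -- A's side: loopA + sumA
    have hA := loopA L n (n + 1).toNat 0 (PySem.Dict.counter L) 0 (by omega)
      (PySem.Dict.nodup_keys_counter L)
      (by
        intro y hy
        rw [PySem.Dict.keys_counter]
        exact (PySem.Set.mem_ofList L y).mpr (hM0 ▸ hy))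
      (by
        intro v
        rw [PySem.Dict.getD_counter, hM0])
    have hS := sumA L n (n + 1).toNat 0 (by omega)
    rw [hM0] at hS
    -- B's side: the fold builds counter L
    have hcB : (PySem.List.pyRange 0 (n + 1) 1).foldl
        (fun d a =>
          let v := PySem.List.pyGetD L a 0
          d.insert v (d.getD v 0 + 1)) PySem.Dict.empty = PySem.Dict.counter L := by
      have h1 : (PySem.List.pyRange 0 (n + 1) 1).foldl
          (fun d a =>
            let v := PySem.List.pyGetD L a 0
            d.insert v (d.getD v 0 + 1)) (PySem.Dict.empty : PySem.Dict Int Int)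
          = (pvM L n 0).foldl (fun d v => d.insert v (d.getD v 0 + 1)) PySem.Dict.empty := by
        unfold pvM
        rw [List.foldl_map]
      rw [h1, hM0, hc0]
    rw [hc0, hA, hS, hcB]
    set d := PySem.Dict.counter L with hd
    have hnd := PySem.Dict.nodup_keys_counter L
    have hcov : ∀ y ∈ L, y ∈ d.keys := by
      intro y hy
      rw [hd, PySem.Dict.keys_counter]
      exact (PySem.Set.mem_ofList L y).mpr hy
    have hcnt : ∀ v, d.getD v 0 = ((L.count v : Nat) : Int) := by
      intro v; rw [hd, PySem.Dict.getD_counter]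
    -- the nested items sum is pvOrd3 L
    have hinner : ∀ v : Int,
        (d.items.map (fun q => q.2 * d.getD (PySem.Int.bxor q.1 v) 0)).sum = pvP2 v L := by
      intro v
      have hcomm : d.items.map (fun q => q.2 * d.getD (PySem.Int.bxor q.1 v) 0)
          = d.items.map (fun q => q.2 * d.getD (PySem.Int.bxor v q.1) 0) := by
        apply List.map_congr_left
        intro q _
        rw [PySem.Int.bxor_comm]
      rw [hcomm, items_conv_sum d L v hnd hcov hcnt]
    have houter : (d.items.map (fun p =>
        p.2 * (d.items.map (fun q => q.2 * d.getD (PySem.Int.bxor q.1 p.1) 0)).sum)).sum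
        = pvOrd3 L := by
      have hmc : d.items.map (fun p =>
          p.2 * (d.items.map (fun q => q.2 * d.getD (PySem.Int.bxor q.1 p.1) 0)).sum)
          = d.items.map (fun p => p.2 * (fun v => pvP2 v L) p.1) := by
        apply List.map_congr_left
        intro p _
        rw [hinner]
      rw [hmc, items_weighted_sum d L (fun v => pvP2 v L) hnd hcov hcnt]
      rfl
    rw [houter, hcnt 0]
    set z : Int := ((L.count 0 : Nat) : Int) with hz
    have hid := six_triLE L
    have hlenI : ((L.length : Nat) : Int) = n + 1 := by omega
    rw [hlenI] at hid
    have hexp : pvOrd3 L - z - 3 * z * n = 6 * (triLE L - z * n - z) := by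
      rw [← hz] at hid
      linarith
    rw [hexp, fdiv_six]
    ring
  · simp only [solve_p310, solve_p310_alt]
    rw [PySem.List.pyRange_one_eq_nil (by omega : n + 1 ≤ 0)]
    simp [PySem.Int.floordiv]

-- ===== VERDICT (by name: the statement is the Claim_ definition above) =====
theorem solve_p310_spec : Claim_equal_solve_p310 := by
  intro n _
  unfold Spec_solve_p310
  exact main_eq n
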